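-- pv_equiv track=rewrite | github.com/glueckf/INES | src/helper/projString.py | add_sequential_numbering
-- ===== SOURCE A (Python) =====
-- def add_sequential_numbering(projection_key):
--     """
--     Add sequential numbering to duplicate event types in a projection string.
--
--     Args:
--         projection_key: String like "AAB" or "ABCA"
--
--     Returns:
--         String with numbered duplicates like "A1A2B" or "A1BA2"
--
--     Example:
--         add_sequential_numbering("AAB") -> "A1A2B"
--         add_sequential_numbering("ABCA") -> "A1BA2"
--     """
--     unique_types = list(set(projection_key))
--     result = list(projection_key)
--
--     for event_type in unique_types:
--         occurrences = result.count(event_type)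
--         if occurrences > 1:
--             counter = 1
--             for i, char in enumerate(result):
--                 if char == event_type:
--                     result[i] = f"{event_type}{counter}"
--                     counter += 1
--
--     return ''.join(result)
-- ===== SOURCE B (Python) =====
-- def add_sequential_numbering(projection_key):
--     total = {}
--     for ch in projection_key:
--         total[ch] = total.get(ch, 0) + 1
--     seen = {}
--     parts = []
--     for ch in projection_key:
--         seen[ch] = seen.get(ch, 0) + 1
--         parts.append(f"{ch}{seen[ch]}" if total[ch] > 1 else ch)
--     return ''.join(parts)
-- ===== Notes on version B (the rewrite author's own statement) =====
-- stated objective: faster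
-- what changed: Replaces A's list(set(...)) plus a full count() scan and a full enumerate rewrite pass per duplicate character type by two linear passes: one dict pass counting occurrences, then one pass emitting each character with its running sequence number.
import Mathlib
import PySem

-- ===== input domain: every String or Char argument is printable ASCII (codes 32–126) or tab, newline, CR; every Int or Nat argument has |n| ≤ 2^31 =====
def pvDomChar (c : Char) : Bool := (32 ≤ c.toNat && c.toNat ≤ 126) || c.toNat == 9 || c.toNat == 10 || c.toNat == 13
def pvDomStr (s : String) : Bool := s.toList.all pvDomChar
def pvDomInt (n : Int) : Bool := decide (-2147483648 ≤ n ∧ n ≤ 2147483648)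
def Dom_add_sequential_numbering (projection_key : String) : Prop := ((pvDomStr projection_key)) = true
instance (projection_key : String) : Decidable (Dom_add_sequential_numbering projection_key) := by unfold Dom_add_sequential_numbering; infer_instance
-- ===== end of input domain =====

-- B replaces A's per-type rescans (set + count + full enumerate pass per duplicate type) by two
-- linear passes with counting dicts; A's iteration over list(set(...)) has hash order, but its
-- result is order-independent (each pass rewrites only its own type's positions), so the ports agree.

-- ===== PORT A =====
def add_sequential_numbering (projection_key : String) : String :=
  let unique_types : PySem.Set Char := PySem.Set.ofList projection_key.toList
  let result0 : List String := projection_key.toList.map (fun c => String.ofList [c])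
  let result : List String := unique_types.foldl (fun res et =>
    let occurrences := PySem.List.count res (String.ofList [et])
    if 1 < occurrences then
      -- for i, char in enumerate(result): if char == event_type: result[i] = f"{event_type}{counter}"; counter += 1
      (res.foldl (fun (p : List String × Int) ch =>
        if ch == String.ofList [et] then
          (p.1 ++ [String.ofList ([et] ++ PySem.Int.toChars p.2)], p.2 + 1)
        else (p.1 ++ [ch], p.2)) ([], (1 : Int))).1
    else res) result0
  PySem.Str.join "" result

-- ===== PORT B =====
def add_sequential_numbering_alt (projection_key : String) : String :=
  let total : PySem.Dict Char Int := projection_key.toList.foldl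
    (fun d ch => d.insert ch (d.getD ch 0 + 1)) PySem.Dict.empty
  let out := projection_key.toList.foldl (fun (p : List String × PySem.Dict Char Int) ch =>
    let n := p.2.getD ch 0 + 1
    let seen := p.2.insert ch n
    (p.1 ++ [if 1 < total.getD ch 0 then String.ofList ([ch] ++ PySem.Int.toChars n)
             else String.ofList [ch]], seen)) ([], PySem.Dict.empty)
  PySem.Str.join "" out.1

-- ===== PRECONDITION & SPEC =====
def Spec_add_sequential_numbering (projection_key : String) (out : String) : Prop := out = add_sequential_numbering_alt projection_key
instance (projection_key : String) (out : String) : Decidable (Spec_add_sequential_numbering projection_key out) := by unfold Spec_add_sequential_numbering; infer_instance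

-- ===== CLAIM (what is proved, stated in full; the proofs are below) =====
def Claim_equal_add_sequential_numbering : Prop := ∀ (projection_key : String), Dom_add_sequential_numbering projection_key → Spec_add_sequential_numbering projection_key (add_sequential_numbering projection_key)

-- ===== LEMMAS AND PROOFS =====

-- the canonical per-position value both programs compute
def pvRender (L ts : List Char) (q : Char × Nat) : String :=
  if q.1 ∈ ts ∧ 1 < L.count q.1 then
    String.ofList (q.1 :: PySem.Int.toChars (((L.take q.2).count q.1 : Int) + 1))
  else String.ofList [q.1]

def pvState (L ts : List Char) : List String := L.zipIdx.map (pvRender L ts)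

theorem pv_toDigitsCore_len (b fuel n : Nat) (acc : List Char) :
    acc.length ≤ (Nat.toDigitsCore b fuel n acc).length := by
  induction fuel generalizing n acc with
  | zero => simp [Nat.toDigitsCore]
  | succ f ih =>
    rw [Nat.toDigitsCore]
    split
    · simp
    · exact le_trans (by simp) (ih _ _)

theorem pv_toChars_ne_nil (n : Int) : PySem.Int.toChars n ≠ [] := by
  have key : ∀ m : Nat, Nat.toDigits 10 m ≠ [] := by
    intro m h
    have h2 : (1 : Nat) ≤ (Nat.toDigits 10 m).length := by
      unfold Nat.toDigits
      rw [Nat.toDigitsCore]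
      split
      · simp
      · exact le_trans (by simp) (pv_toDigitsCore_len _ _ _ _)
    simp [h] at h2
  unfold PySem.Int.toChars
  split
  · simp
  · exact key _

theorem pv_numbered_ne_single (c d : Char) (n : Int) :
    String.ofList (c :: PySem.Int.toChars n) ≠ String.ofList [d] := by
  intro h
  have h2 := congrArg String.toList h
  simp at h2
  exact pv_toChars_ne_nil n h2.2

theorem pv_single_eq_iff (c d : Char) : String.ofList [c] = String.ofList [d] ↔ c = d := by
  constructor
  · intro h; have h2 := congrArg String.toList h; simpa using h2
  · rintro rfl; rfl

theorem pv_render_eq_single_iff (L ts : List Char) (et : Char) (het : et ∉ ts) (q : Char × Nat) :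
    pvRender L ts q = String.ofList [et] ↔ q.1 = et := by
  unfold pvRender
  split
  · rename_i h
    constructor
    · intro h2; exact absurd h2 (pv_numbered_ne_single _ _ _)
    · rintro rfl; exact absurd h.1 het
  · exact pv_single_eq_iff _ _

theorem pv_countP_zipIdx_fst {α : Type} (L : List α) (p : α → Bool) :
    ∀ k, (L.zipIdx k).countP (fun q => p q.1) = L.countP p := by
  induction L with
  | nil => intro k; rfl
  | cons c rest ih =>
    intro k
    rw [List.zipIdx_cons]
    simp [List.countP_cons, ih]

theorem pv_count_state (L ts : List Char) (et : Char) (het : et ∉ ts) :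
    PySem.List.count (pvState L ts) (String.ofList [et]) = L.count et := by
  unfold PySem.List.count pvState
  rw [List.count_eq_countP, List.countP_map]
  have heq : ∀ q ∈ L.zipIdx, ((fun x => x == String.ofList [et]) ∘ pvRender L ts) q = true
      ↔ (fun q : Char × Nat => q.1 == et) q = true := by
    intro q _
    by_cases h : q.1 = et
    · simp [Function.comp, (pv_render_eq_single_iff L ts et het q).2 h, h]
    · have hne : pvRender L ts q ≠ String.ofList [et] :=
        fun hh => h ((pv_render_eq_single_iff L ts et het q).1 hh)
      simp [Function.comp, hne, h]
  rw [List.countP_congr heq]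
  exact (pv_countP_zipIdx_fst L (fun c => c == et) 0).trans (List.count_eq_countP).symm

theorem pv_state_congr (L ts ts' : List Char) (h : ∀ c, c ∈ ts ↔ c ∈ ts') :
    pvState L ts = pvState L ts' := by
  unfold pvState pvRender
  exact List.map_congr_left (fun q _ => by by_cases h2 : 1 < L.count q.1 <;> simp [h q.1, h2])

theorem pv_state_cons_of_le (L ts : List Char) (et : Char) (h : ¬ 1 < L.count et) :
    pvState L (et :: ts) = pvState L ts := by
  unfold pvState pvRender
  refine List.map_congr_left (fun q _ => ?_)
  by_cases h1 : q.1 = et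
  · subst h1; simp [h]
  · simp [List.mem_cons, h1]

theorem pv_inner_go (L : List Char) (et : Char) (ts : List Char) (het : et ∉ ts)
    (hcnt : 1 < L.count et) :
    ∀ (suf pre : List Char) (acc : List String), L = pre ++ suf →
    ((suf.zipIdx pre.length).map (pvRender L ts)).foldl
      (fun (p : List String × Int) ch =>
        if ch == String.ofList [et] then
          (p.1 ++ [String.ofList ([et] ++ PySem.Int.toChars p.2)], p.2 + 1)
        else (p.1 ++ [ch], p.2))
      (acc, ((pre.count et : Int) + 1))
    = (acc ++ (suf.zipIdx pre.length).map (pvRender L (et :: ts)), ((L.count et : Int) + 1)) := by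
  intro suf
  induction suf with
  | nil => intro pre acc hL; subst hL; simp
  | cons c rest ih =>
    intro pre acc hL
    rw [List.zipIdx_cons, List.map_cons, List.map_cons, List.foldl_cons]
    have hpre : L.take pre.length = pre := by rw [hL]; exact List.take_left
    by_cases hc : c = et
    · subst hc
      have hr : pvRender L ts (c, pre.length) = String.ofList [c] :=
        (pv_render_eq_single_iff L ts c het (c, pre.length)).2 rfl
      rw [hr]
      simp only [beq_self_eq_true, if_true]
      have hcount : ((pre ++ [c]).count c : Int) + 1 = (pre.count c : Int) + 1 + 1 := by
        simp [List.count_append]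
      have hlen : (pre ++ [c]).length = pre.length + 1 := by simp
      have := ih (pre ++ [c]) (acc ++ [String.ofList ([c] ++ PySem.Int.toChars ((pre.count c : Int) + 1))])
        (by rw [hL]; simp)
      rw [hlen, hcount] at this
      rw [this]
      have hr' : pvRender L (c :: ts) (c, pre.length)
          = String.ofList (c :: PySem.Int.toChars ((pre.count c : Int) + 1)) := by
        unfold pvRender
        rw [if_pos ⟨List.mem_cons_self, hcnt⟩, hpre]
      rw [hr']
      simp
    · have hr : pvRender L ts (c, pre.length) ≠ String.ofList [et] := by
        intro h; exact hc ((pv_render_eq_single_iff L ts et het (c, pre.length)).1 h)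
      rw [if_neg (by simpa using hr)]
      have hcount : ((pre ++ [c]).count et : Int) + 1 = (pre.count et : Int) + 1 := by
        simp [List.count_append, hc]
      have hlen : (pre ++ [c]).length = pre.length + 1 := by simp
      have := ih (pre ++ [c]) (acc ++ [pvRender L ts (c, pre.length)]) (by rw [hL]; simp)
      rw [hlen, hcount] at this
      rw [this]
      have hr' : pvRender L (et :: ts) (c, pre.length) = pvRender L ts (c, pre.length) := by
        unfold pvRender
        simp [List.mem_cons, hc]
      rw [hr']
      simp

theorem pv_outer_go (L : List Char) :
    ∀ (uts ts : List Char), uts.Nodup → (∀ x ∈ uts, x ∉ ts) →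
    uts.foldl (fun res et =>
      let occurrences := PySem.List.count res (String.ofList [et])
      if 1 < occurrences then
        (res.foldl (fun (p : List String × Int) ch =>
          if ch == String.ofList [et] then
            (p.1 ++ [String.ofList ([et] ++ PySem.Int.toChars p.2)], p.2 + 1)
          else (p.1 ++ [ch], p.2)) ([], (1 : Int))).1
      else res) (pvState L ts)
    = pvState L (uts ++ ts) := by
  intro uts
  induction uts with
  | nil => intro ts _ _; simp
  | cons et rest ih =>
    intro ts hnd hdisj
    rw [List.foldl_cons]
    have het : et ∉ ts := hdisj et (List.mem_cons_self)
    have hcnt := pv_count_state L ts et het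
    have hstep : (let occurrences := PySem.List.count (pvState L ts) (String.ofList [et])
      if 1 < occurrences then
        ((pvState L ts).foldl (fun (p : List String × Int) ch =>
          if ch == String.ofList [et] then
            (p.1 ++ [String.ofList ([et] ++ PySem.Int.toChars p.2)], p.2 + 1)
          else (p.1 ++ [ch], p.2)) ([], (1 : Int))).1
      else pvState L ts) = pvState L (et :: ts) := by
      simp only [hcnt]
      by_cases h1 : 1 < L.count et
      · rw [if_pos h1]
        have := pv_inner_go L et ts het h1 L [] [] (by simp)
        simp only [List.length_nil, List.count_nil, Nat.cast_zero, zero_add] at this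
        rw [show pvState L ts = (L.zipIdx 0).map (pvRender L ts) from rfl, this]
        rfl
      · rw [if_neg h1, pv_state_cons_of_le L ts et h1]
    rw [hstep]
    have hrest : ∀ x ∈ rest, x ∉ et :: ts := by
      intro x hx
      simp only [List.mem_cons, not_or]
      exact ⟨fun h => (List.nodup_cons.1 hnd).1 (h ▸ hx), hdisj x (List.mem_cons_of_mem _ hx)⟩
    rw [ih (et :: ts) (List.nodup_cons.1 hnd).2 hrest]
    exact pv_state_congr L _ _ (fun c => by simp [or_left_comm])

theorem pv_map_zipIdx_fst {α β : Type} (L : List α) (f : α → β) :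
    ∀ k, (L.zipIdx k).map (fun q => f q.1) = L.map f := by
  induction L with
  | nil => intro k; rfl
  | cons c rest ih => intro k; rw [List.zipIdx_cons]; simp [ih]

-- A's list equals the canonical state over all of L's characters
theorem pv_A_state (L : List Char) :
    (PySem.Set.ofList L).foldl (fun res et =>
      let occurrences := PySem.List.count res (String.ofList [et])
      if 1 < occurrences then
        (res.foldl (fun (p : List String × Int) ch =>
          if ch == String.ofList [et] then
            (p.1 ++ [String.ofList ([et] ++ PySem.Int.toChars p.2)], p.2 + 1)
          else (p.1 ++ [ch], p.2)) ([], (1 : Int))).1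
      else res) (L.map (fun c => String.ofList [c]))
    = pvState L (PySem.Set.ofList L) := by
  have h0 : pvState L [] = L.map (fun c => String.ofList [c]) := by
    unfold pvState pvRender
    rw [show L.zipIdx = L.zipIdx 0 from rfl, ← pv_map_zipIdx_fst L (fun c => String.ofList [c]) 0]
    exact List.map_congr_left (fun q _ => by simp)
  rw [← h0, pv_outer_go L (PySem.Set.ofList L) [] (PySem.Set.nodup_ofList L) (by simp)]
  simp

theorem pv_B_go (L : List Char) :
    ∀ (suf pre : List Char) (acc : List String), L = pre ++ suf →
    suf.foldl (fun (p : List String × PySem.Dict Char Int) ch =>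
      let n := p.2.getD ch 0 + 1
      let seen := p.2.insert ch n
      (p.1 ++ [if 1 < (PySem.Dict.counter L).getD ch 0 then String.ofList ([ch] ++ PySem.Int.toChars n)
               else String.ofList [ch]], seen)) (acc, PySem.Dict.counter pre)
    = (acc ++ (suf.zipIdx pre.length).map (pvRender L L), PySem.Dict.counter L) := by
  intro suf
  induction suf with
  | nil => intro pre acc hL; subst hL; simp
  | cons c rest ih =>
    intro pre acc hL
    rw [List.foldl_cons, List.zipIdx_cons, List.map_cons]
    have hpre : L.take pre.length = pre := by rw [hL]; exact List.take_left
    have hmem : c ∈ L := by rw [hL]; simp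
    have hn : (PySem.Dict.counter pre).getD c 0 + 1 = ((pre.count c : Int) + 1) := by
      rw [PySem.Dict.getD_counter]
    have hins : (PySem.Dict.counter pre).insert c ((PySem.Dict.counter pre).getD c 0 + 1)
        = PySem.Dict.counter (pre ++ [c]) := by
      rw [← PySem.Dict.foldl_insert_getD_add_one_eq_counter,
          ← PySem.Dict.foldl_insert_getD_add_one_eq_counter, List.foldl_append]
      rfl
    have htot : (PySem.Dict.counter L).getD c 0 = (L.count c : Int) := PySem.Dict.getD_counter L c
    have hhead : (if 1 < (PySem.Dict.counter L).getD c 0 then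
        String.ofList ([c] ++ PySem.Int.toChars ((PySem.Dict.counter pre).getD c 0 + 1))
        else String.ofList [c]) = pvRender L L (c, pre.length) := by
      unfold pvRender
      rw [htot, hn, hpre]
      by_cases h1 : 1 < L.count c
      · rw [if_pos (by exact_mod_cast h1), if_pos ⟨hmem, h1⟩]; rfl
      · rw [if_neg (by exact_mod_cast h1), if_neg (by simp [hmem, h1])]
    simp only []
    rw [hins, hhead]
    have := ih (pre ++ [c]) (acc ++ [pvRender L L (c, pre.length)]) (by rw [hL]; simp)
    rw [show (pre ++ [c]).length = pre.length + 1 from by simp] at this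
    rw [this]
    simp

theorem pv_B_state (L : List Char) :
    (L.foldl (fun (p : List String × PySem.Dict Char Int) ch =>
      let n := p.2.getD ch 0 + 1
      let seen := p.2.insert ch n
      (p.1 ++ [if 1 < (PySem.Dict.counter L).getD ch 0 then String.ofList ([ch] ++ PySem.Int.toChars n)
               else String.ofList [ch]], seen)) ([], PySem.Dict.empty)).1
    = pvState L L := by
  have h0 : (PySem.Dict.empty : PySem.Dict Char Int) = PySem.Dict.counter [] := by
    rw [← PySem.Dict.foldl_insert_getD_add_one_eq_counter]; rfl
  rw [h0, pv_B_go L L [] [] (by simp)]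
  rfl

-- ===== VERDICT (by name: the statement is the Claim_ definition above) =====
theorem add_sequential_numbering_spec : Claim_equal_add_sequential_numbering := by
  intro pk _
  unfold Spec_add_sequential_numbering
  simp only [add_sequential_numbering, add_sequential_numbering_alt]
  rw [PySem.Dict.foldl_insert_getD_add_one_eq_counter]
  rw [pv_A_state pk.toList, pv_B_state pk.toList]
  exact congrArg _ (pv_state_congr _ _ _ (fun c => PySem.Set.mem_ofList pk.toList c))
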